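-- pv_equiv track=rewrite | github.com/LitongPeng/subnet-calculator | litong.py | zero_num
-- ===== SOURCE A (Python) =====
-- def zero_num(binary):
--     one = True
--     zero = 0
--     for ib in binary:
--         if ib == '1' and one:
--             continue
--         elif ib == '0' and one:
--             one = False
--         elif ib == '0' and not one:
--             zero += 1
--     return zero
-- ===== SOURCE B (Python) =====
-- def zero_num(binary):
--     c = binary.count('0')
--     return c - 1 if c else 0
-- ===== Notes on version B (the rewrite author's own statement) =====
-- stated objective: simpler
-- what changed: Replaced A's per-character state machine (a flag toggled at the first zero, then counting) by a closed form: zeros after the first zero = total zero count minus one when any exist, computed with a single str.count call.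
import Mathlib
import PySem

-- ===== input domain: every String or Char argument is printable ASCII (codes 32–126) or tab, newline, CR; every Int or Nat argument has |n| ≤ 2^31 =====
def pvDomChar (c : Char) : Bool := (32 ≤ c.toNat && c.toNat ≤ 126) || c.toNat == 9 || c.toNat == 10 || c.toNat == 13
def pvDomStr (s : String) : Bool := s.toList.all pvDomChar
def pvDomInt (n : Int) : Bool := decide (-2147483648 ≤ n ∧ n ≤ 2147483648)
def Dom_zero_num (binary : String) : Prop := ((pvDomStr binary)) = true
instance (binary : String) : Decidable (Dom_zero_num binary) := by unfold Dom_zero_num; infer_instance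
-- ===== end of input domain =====

-- B replaces A's one-flag state machine by a single count of '0' characters minus one (objective: simpler).

-- ===== PORT A =====
-- state (one, zero); the loop body follows A's branch order
def zero_num (binary : String) : Int :=
  (binary.toList.foldl
    (fun (st : Bool × Int) ib =>
      if ib == '1' && st.1 then st
      else if ib == '0' && st.1 then (false, st.2)
      else if ib == '0' && !st.1 then (st.1, st.2 + 1)
      else st)
    (true, 0)).2

-- ===== PORT B =====
def zero_num_alt (binary : String) : Int :=
  let c := PySem.Str.count binary "0"
  if c ≠ 0 then (c : Int) - 1 else 0

-- ===== PRECONDITION & SPEC =====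
def Spec_zero_num (binary : String) (out : Int) : Prop := out = zero_num_alt binary
instance (binary : String) (out : Int) : Decidable (Spec_zero_num binary out) := by unfold Spec_zero_num; infer_instance

-- ===== CLAIM (what is proved, stated in full; the proofs are below) =====
def Claim_equal_zero_num : Prop := ∀ (binary : String), Dom_zero_num binary → Spec_zero_num binary (zero_num binary)

-- ===== LEMMAS AND PROOFS =====

-- abbreviation for A's loop body (proof-side only)
def pvStepA (st : Bool × Int) (ib : Char) : Bool × Int :=
  if ib == '1' && st.1 then st
  else if ib == '0' && st.1 then (false, st.2)
  else if ib == '0' && !st.1 then (st.1, st.2 + 1)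
  else st

theorem foldA_false (l : List Char) : ∀ z : Int,
    (l.foldl pvStepA (false, z)).2 = z + l.count '0' := by
  induction l with
  | nil => intro z; simp [List.count]
  | cons h t ih =>
    intro z
    by_cases h0 : h = '0'
    · simp [pvStepA, h0, ih]; ring
    · simp [pvStepA, h0, ih]

theorem foldA_true (l : List Char) : ∀ z : Int,
    (l.foldl pvStepA (true, z)).2 =
      z + (if l.count '0' = 0 then 0 else (l.count '0' : Int) - 1) := by
  induction l with
  | nil => intro z; simp [List.count]
  | cons h t ih =>
    intro z
    by_cases h0 : h = '0'
    · simp [pvStepA, h0, foldA_false]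
    · by_cases h1 : h = '1' <;>
        simp [pvStepA, h0, h1, ih]

-- PySem.Chars.count with a one-character pattern is List.count
theorem count_go_singleton (c : Char) (s : List Char) : ∀ (fuel : Nat) (acc : Nat),
    s.length ≤ fuel →
    PySem.Chars.count.go [c] fuel s acc = acc + s.count c := by
  induction s with
  | nil =>
    intro fuel acc _
    cases fuel <;> simp [PySem.Chars.count.go, List.count]
  | cons h t ih =>
    intro fuel acc hle
    cases fuel with
    | zero => simp at hle
    | succ n =>
      simp only [List.length_cons, Nat.succ_le_succ_iff] at hle
      by_cases h0 : h = c
      · simp [PySem.Chars.count.go, List.isPrefixOf, h0, ih n _ hle]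
        omega
      · simp [PySem.Chars.count.go, List.isPrefixOf, h0, Ne.symm h0, ih n _ hle]

theorem chars_count_singleton (c : Char) (s : List Char) :
    PySem.Chars.count s [c] = s.count c := by
  simpa [PySem.Chars.count] using count_go_singleton c s s.length 0 le_rfl

-- ===== VERDICT (by name: the statement is the Claim_ definition above) =====
theorem zero_num_spec : Claim_equal_zero_num := by
  intro binary _
  show zero_num binary = zero_num_alt binary
  have hb : PySem.Str.count binary "0" = binary.toList.count '0' := by
    simpa using chars_count_singleton '0' binary.toList
  have hA : zero_num binary = (binary.toList.foldl pvStepA (true, 0)).2 := rfl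
  rw [hA, foldA_true binary.toList 0]
  unfold zero_num_alt
  rw [hb]
  by_cases hc : binary.toList.count '0' = 0 <;> simp [hc]
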